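-- pv_equiv track=rewrite | github.com/openJiuwen-ai/deepsearch | openjiuwen_deepsearch/algorithm/user_feedback_processor/synonym_rewrite.py | _adjust_offsets_for_position_changes
-- ===== SOURCE A (Python) =====
-- def _adjust_offsets_for_position_changes(
--     citation_data: list, position_changes: list[tuple[int, int]]
-- ) -> list:
--     """根据文本替换产生的位置变化修正引用偏移量。
--
--     position_changes 中的 position 是替换前原始文本的坐标，
--     citation 的 start/end offset 也是在同一坐标系下，因此可直接累加 delta。
--     """
--     for item in citation_data:
--         cit_start = item.get("citation_start_offset")
--         if cit_start is None:
--             continue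
--         adjustment = sum(delta for pos, delta in position_changes if pos < cit_start)
--         if adjustment:
--             item["citation_start_offset"] = cit_start + adjustment
--             item["citation_end_offset"] = item.get("citation_end_offset", 0) + adjustment
--     return citation_data
-- ===== SOURCE B (Python) =====
-- def _adjust_offsets_for_position_changes(citation_data, position_changes):
--     # Sort the changes once, sort the distinct citation start offsets, and compute
--     # the cumulative adjustment for every start in one merged sweep; then apply.
--     # Mutates the items of citation_data in place, exactly as the original does.
--     changes = sorted(position_changes, key=lambda t: t[0])
--     starts = sorted({item.get("citation_start_offset") for item in citation_data
--                      if item.get("citation_start_offset") is not None})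
--     adj = {}
--     acc = 0
--     i = 0
--     n = len(changes)
--     for s in starts:
--         while i < n and changes[i][0] < s:
--             acc += changes[i][1]
--             i += 1
--         adj[s] = acc
--     for item in citation_data:
--         cit_start = item.get("citation_start_offset")
--         if cit_start is None:
--             continue
--         adjustment = adj[cit_start]
--         if adjustment:
--             item["citation_start_offset"] = cit_start + adjustment
--             item["citation_end_offset"] = item.get("citation_end_offset", 0) + adjustment
--     return citation_data
-- ===== Notes on version B (the rewrite author's own statement) =====
-- stated objective: alternative
-- what changed: Instead of re-scanning all position_changes for every citation (a filtered-generator sum per item), B sorts the changes once, sorts the distinct citation start offsets, computes the cumulative adjustment for each start in a single merged sweep with a running sum, and then applies it per item via one dict lookup.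
import Mathlib
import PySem

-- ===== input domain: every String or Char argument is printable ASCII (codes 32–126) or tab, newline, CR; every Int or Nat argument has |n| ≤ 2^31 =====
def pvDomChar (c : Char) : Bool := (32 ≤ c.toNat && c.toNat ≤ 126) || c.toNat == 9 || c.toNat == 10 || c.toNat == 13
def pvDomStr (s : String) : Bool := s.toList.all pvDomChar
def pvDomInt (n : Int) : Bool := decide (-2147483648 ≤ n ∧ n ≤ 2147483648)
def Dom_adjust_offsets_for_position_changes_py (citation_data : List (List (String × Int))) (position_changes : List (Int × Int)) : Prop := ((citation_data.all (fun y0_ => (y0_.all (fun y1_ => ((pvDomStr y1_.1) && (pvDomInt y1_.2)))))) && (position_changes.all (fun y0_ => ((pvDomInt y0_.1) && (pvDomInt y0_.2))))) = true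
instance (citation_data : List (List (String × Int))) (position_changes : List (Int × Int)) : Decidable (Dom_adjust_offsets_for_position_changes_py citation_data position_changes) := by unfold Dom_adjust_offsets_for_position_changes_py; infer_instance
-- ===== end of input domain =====

-- B replaces A's per-citation rescan of position_changes by a sort + one merged
-- sweep accumulating prefix sums per distinct start offset, looked up per item.
-- (A mutates the item dicts in place; B performs the same mutations; the
-- equivalence proved here is about the returned value.)


-- ===== PORT A =====
-- body of A's 'for item in citation_data' loop (mutates one item)
def pvAdjustA (position_changes : List (Int × Int)) (item : List (String × Int)) : List (String × Int) :=
  match (PySem.Dict.mk item).get? "citation_start_offset" with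
  | none => item
  | some cit_start =>
    -- sum(delta for pos, delta in position_changes if pos < cit_start)
    let adjustment := position_changes.foldl (fun acc pd => if pd.1 < cit_start then acc + pd.2 else acc) 0
    if adjustment ≠ 0 then
      let d := (PySem.Dict.mk item).insert "citation_start_offset" (cit_start + adjustment)
      let d := d.insert "citation_end_offset" (d.getD "citation_end_offset" 0 + adjustment)
      d.items
    else item

def adjust_offsets_for_position_changes_py (citation_data : List (List (String × Int))) (position_changes : List (Int × Int)) : List (List (String × Int)) :=
  citation_data.map (pvAdjustA position_changes)

-- ===== PORT B =====
-- the 'for s in starts' loop with the inner 'while i < n and changes[i][0] < s'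
-- pointer loop: that while loop consumes exactly the prefix of the remaining
-- changes whose position is < s, adding their deltas to acc
def pvSweepB (adj : PySem.Dict Int Int) (acc : Int) (cs : List (Int × Int)) (ss : List Int) : PySem.Dict Int Int :=
  match ss with
  | [] => adj
  | s :: ss' =>
    let pre := cs.takeWhile (fun pd => decide (pd.1 < s))
    let rest := cs.dropWhile (fun pd => decide (pd.1 < s))
    let acc' := acc + (pre.map Prod.snd).sum
    pvSweepB (adj.insert s acc') acc' rest ss'

-- body of B's second loop (mutates one item; adj[cit_start]: the key is always
-- present, since every start was inserted by the sweep, so getD is exact)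
def pvAdjustB (adj : PySem.Dict Int Int) (item : List (String × Int)) : List (String × Int) :=
  match (PySem.Dict.mk item).get? "citation_start_offset" with
  | none => item
  | some cit_start =>
    let adjustment := adj.getD cit_start 0
    if adjustment ≠ 0 then
      let d := (PySem.Dict.mk item).insert "citation_start_offset" (cit_start + adjustment)
      let d := d.insert "citation_end_offset" (d.getD "citation_end_offset" 0 + adjustment)
      d.items
    else item

def adjust_offsets_for_position_changes_py_alt (citation_data : List (List (String × Int))) (position_changes : List (Int × Int)) : List (List (String × Int)) :=
  let changes := PySem.List.sorted position_changes (fun t => t.1) false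
  let starts := PySem.List.sorted (PySem.Set.ofList (citation_data.filterMap (fun item => (PySem.Dict.mk item).get? "citation_start_offset"))) (fun x => x) false
  let adj := pvSweepB PySem.Dict.empty 0 changes starts
  citation_data.map (pvAdjustB adj)

-- ===== PRECONDITION & SPEC =====
def Spec_adjust_offsets_for_position_changes_py (citation_data : List (List (String × Int))) (position_changes : List (Int × Int)) (out : List (List (String × Int))) : Prop := out = adjust_offsets_for_position_changes_py_alt citation_data position_changes
instance (citation_data : List (List (String × Int))) (position_changes : List (Int × Int)) (out : List (List (String × Int))) : Decidable (Spec_adjust_offsets_for_position_changes_py citation_data position_changes out) := by unfold Spec_adjust_offsets_for_position_changes_py; infer_instance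

-- ===== CLAIM (what is proved, stated in full; the proofs are below) =====
def Claim_equal_adjust_offsets_for_position_changes_py : Prop := ∀ (citation_data : List (List (String × Int))) (position_changes : List (Int × Int)), Dom_adjust_offsets_for_position_changes_py citation_data position_changes → Spec_adjust_offsets_for_position_changes_py citation_data position_changes (adjust_offsets_for_position_changes_py citation_data position_changes)

-- ===== LEMMAS AND PROOFS =====

-- total delta of the changes in cs whose position is < c
def pvS (cs : List (Int × Int)) (c : Int) : Int :=
  ((cs.filter (fun pd => decide (pd.1 < c))).map Prod.snd).sum

-- A's filtered-generator sum is pvS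
theorem pvFoldA_eq_S (cs : List (Int × Int)) (c : Int) (a : Int) :
    cs.foldl (fun acc pd => if pd.1 < c then acc + pd.2 else acc) a = a + pvS cs c := by
  induction cs generalizing a with
  | nil => simp [pvS]
  | cons h t ih =>
    simp only [List.foldl_cons, List.filter_cons, pvS]
    by_cases hc : h.1 < c
    · simp [hc, ih, pvS]; ring
    · simp [hc, ih, pvS]

-- pvS is invariant under permutation (sorting)
theorem pvS_perm {cs cs' : List (Int × Int)} (h : cs.Perm cs') (c : Int) :
    pvS cs c = pvS cs' c := by
  exact List.Perm.sum_eq ((h.filter _).map _)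

-- on a list sorted by position, the changes with position < s are its takeWhile prefix
theorem pvFilter_eq_takeWhile (cs : List (Int × Int)) (s : Int)
    (hs : cs.Pairwise (fun a b => a.1 ≤ b.1)) :
    cs.filter (fun pd => decide (pd.1 < s)) = cs.takeWhile (fun pd => decide (pd.1 < s)) := by
  induction cs with
  | nil => rfl
  | cons h t ih =>
    rcases List.pairwise_cons.mp hs with ⟨hrel, ht⟩
    by_cases hc : h.1 < s
    · simp [hc, ih ht]
    · rw [List.filter_cons, List.takeWhile_cons]
      simp only [hc, decide_false, Bool.false_eq_true, if_false]
      refine List.filter_eq_nil_iff.mpr ?_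
      intro x hx
      simp only [decide_eq_true_eq]
      have := hrel x hx
      omega

-- sweep lookup is untouched by starts that are not the key
theorem pvSweepB_get?_not_mem (adj : PySem.Dict Int Int) (acc : Int) (cs : List (Int × Int))
    (ss : List Int) (x : Int) (hx : x ∉ ss) :
    (pvSweepB adj acc cs ss).get? x = adj.get? x := by
  induction ss generalizing adj acc cs with
  | nil => rfl
  | cons s ss' ih =>
    simp only [pvSweepB]
    rw [ih _ _ _ (fun h => hx (List.mem_cons_of_mem _ h))]
    exact PySem.Dict.get?_insert_of_ne adj _ (fun h : x = s => hx (h ▸ List.mem_cons_self))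

-- the sweep records, for every start s, acc plus the total delta at positions < s
theorem pvSweepB_get? (ss : List Int) (cs : List (Int × Int)) (adj : PySem.Dict Int Int)
    (acc : Int) (c : Int) (hc : c ∈ ss)
    (hss : ss.Pairwise (· < ·)) (hcs : cs.Pairwise (fun a b => a.1 ≤ b.1)) :
    (pvSweepB adj acc cs ss).get? c = some (acc + pvS cs c) := by
  induction ss generalizing cs adj acc with
  | nil => cases hc
  | cons s ss' ih =>
    rcases List.pairwise_cons.mp hss with ⟨hlt, hss'⟩
    have hsplit : cs.takeWhile (fun pd => decide (pd.1 < s)) ++ cs.dropWhile (fun pd => decide (pd.1 < s)) = cs := List.takeWhile_append_dropWhile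
    rcases List.mem_cons.mp hc with rfl | hc'
    · -- c = s: later starts are all > s, so the entry written now survives
      simp only [pvSweepB]
      rw [pvSweepB_get?_not_mem _ _ _ _ _ (fun h => absurd (hlt _ h) (lt_irrefl _))]
      rw [PySem.Dict.get?_insert_self]
      have : pvS cs c = ((cs.takeWhile (fun pd => decide (pd.1 < c))).map Prod.snd).sum := by
        rw [pvS, pvFilter_eq_takeWhile _ _ hcs]
      rw [this]
    · -- c ∈ ss': recurse on the remaining changes, accounting for the consumed prefix
      simp only [pvSweepB]
      have hrest : (cs.dropWhile (fun pd => decide (pd.1 < s))).Pairwise (fun a b => a.1 ≤ b.1) :=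
        hcs.sublist (List.dropWhile_sublist _)
      rw [ih _ _ _ hc' hss' hrest]
      congr 1
      have hsc : s < c := hlt _ hc'
      -- pvS cs c = sum of the consumed prefix + pvS of the rest
      have hdecomp : pvS cs c = pvS (cs.takeWhile (fun pd => decide (pd.1 < s))) c + pvS (cs.dropWhile (fun pd => decide (pd.1 < s))) c := by
        have h2 := congrArg (fun l => ((l.filter (fun pd => decide (pd.1 < c))).map Prod.snd).sum) hsplit
        simp only [List.filter_append, List.map_append, List.sum_append] at h2
        simpa [pvS] using h2.symm
      have hpre : pvS (cs.takeWhile (fun pd => decide (pd.1 < s))) c = ((cs.takeWhile (fun pd => decide (pd.1 < s))).map Prod.snd).sum := by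
        unfold pvS
        congr 1
        refine congrArg _ (List.filter_eq_self.mpr ?_)
        intro x hx
        have := List.mem_takeWhile_imp hx
        simp only [decide_eq_true_eq] at this ⊢
        omega
      rw [hdecomp, hpre]; ring

-- per item: A's recomputed sum equals B's dict lookup
theorem pvAdjust_eq (position_changes : List (Int × Int))
    (citation_data : List (List (String × Int))) (item : List (String × Int))
    (hmem : item ∈ citation_data) :
    pvAdjustA position_changes item =
    pvAdjustB (pvSweepB PySem.Dict.empty 0
      (PySem.List.sorted position_changes (fun t => t.1) false)
      (PySem.List.sorted (PySem.Set.ofList (citation_data.filterMap (fun item => (PySem.Dict.mk item).get? "citation_start_offset"))) (fun x => x) false)) item := by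
  unfold pvAdjustA pvAdjustB
  cases hg : (PySem.Dict.mk item).get? "citation_start_offset" with
  | none => rfl
  | some c =>
    have hcmem : c ∈ PySem.List.sorted (PySem.Set.ofList (citation_data.filterMap (fun item => (PySem.Dict.mk item).get? "citation_start_offset"))) (fun x => x) false := by
      rw [PySem.List.mem_sorted, PySem.Set.mem_ofList]
      exact List.mem_filterMap.mpr ⟨item, hmem, hg⟩
    have hget := pvSweepB_get?
      (PySem.List.sorted (PySem.Set.ofList (citation_data.filterMap (fun item => (PySem.Dict.mk item).get? "citation_start_offset"))) (fun x => x) false)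
      (PySem.List.sorted position_changes (fun t => t.1) false)
      PySem.Dict.empty 0 c hcmem
      (PySem.List.sorted_ofList_pairwise_lt _)
      (PySem.List.sorted_pairwise _ _)
    have hAsum := pvFoldA_eq_S position_changes c 0
    have hperm : pvS (PySem.List.sorted position_changes (fun t => t.1) false) c = pvS position_changes c :=
      pvS_perm (PySem.List.sorted_perm _ _ _) c
    simp only [PySem.Dict.getD_eq_get?_getD, hget, hperm, Option.getD_some, hAsum, zero_add]

-- ===== VERDICT (by name: the statement is the Claim_ definition above) =====
theorem adjust_offsets_for_position_changes_py_spec : Claim_equal_adjust_offsets_for_position_changes_py := by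
  intro citation_data position_changes _
  unfold Spec_adjust_offsets_for_position_changes_py
  unfold adjust_offsets_for_position_changes_py adjust_offsets_for_position_changes_py_alt
  exact List.map_congr_left (fun item hmem => pvAdjust_eq position_changes citation_data item hmem)
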